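-- pv_equiv track=rewrite | github.com/Ryan0v0/BUAA_BigDataCourse | problem2/pyspark/problem2_spark.py | join1
-- ===== SOURCE A (Python) =====
-- def join1(items):
--     res = []
--     lft = []
--     for item in items:
--         if item[0] == "order":
--             lft = item
--             break
--     if len(lft) == 0:
--         return res
--     for item in items:
--         if item[0] == "line_item":
--             res.append(lft + item)
--     return res
-- ===== SOURCE B (Python) =====
-- def join1(items):
--     order = None
--     pending = []
--     res = []
--     for it in items:
--         tag = it[0]
--         if order is None and tag == "order":
--             order = it
--         if tag == "line_item":
--             if order is None:
--                 pending.append(it)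
--             else:
--                 res.append(order + it)
--     if order is None:
--         return []
--     return [order + p for p in pending] + res
-- ===== Notes on version B (the rewrite author's own statement) =====
-- stated objective: alternative
-- what changed: Single pass over items maintaining the first-order slot and a pending buffer for line_items seen before the order, instead of A's two separate scans.
-- outside the precondition, e.g. on join1([['order', '1'], []]): A raises IndexError, B raises IndexError
import Mathlib
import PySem

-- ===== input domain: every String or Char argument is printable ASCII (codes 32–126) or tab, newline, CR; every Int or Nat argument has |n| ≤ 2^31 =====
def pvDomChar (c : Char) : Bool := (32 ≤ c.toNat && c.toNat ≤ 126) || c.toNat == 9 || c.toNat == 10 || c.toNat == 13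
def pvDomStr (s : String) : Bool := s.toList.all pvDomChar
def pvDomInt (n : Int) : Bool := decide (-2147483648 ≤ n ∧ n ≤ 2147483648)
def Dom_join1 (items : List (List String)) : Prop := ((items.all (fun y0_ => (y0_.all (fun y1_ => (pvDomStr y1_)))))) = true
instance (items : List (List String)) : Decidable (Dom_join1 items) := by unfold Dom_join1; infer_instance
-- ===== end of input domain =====

-- B replaces A's two scans (find the first order, then collect line_items) by one pass
-- with a pending buffer for line_items seen before the order: a different decomposition, same cost.
-- Pre_ excludes inputs containing an empty sublist, on which both Pythons raise IndexError (item[0]).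


-- ===== PORT A =====
-- first loop of A: scan until the first item with item[0] == "order", else keep lft = []
def join1_findOrder : List (List String) → List String
  | [] => []
  | item :: rest =>
    if PySem.List.pyGet? item 0 = some "order" then item else join1_findOrder rest

def join1 (items : List (List String)) : List (List String) :=
  let lft := join1_findOrder items
  if lft.length = 0 then []
  else items.foldl (fun res item =>
    if PySem.List.pyGet? item 0 = some "line_item" then res ++ [lft ++ item] else res) []

-- ===== PORT B =====
-- one step of B's single loop over state (order, pending, res)
def join1_step (s : Option (List String) × List (List String) × List (List String))
    (it : List String) : Option (List String) × List (List String) × List (List String) :=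
  let order := if s.1 = none ∧ PySem.List.pyGet? it 0 = some "order" then some it else s.1
  if PySem.List.pyGet? it 0 = some "line_item" then
    match order with
    | none => (order, s.2.1 ++ [it], s.2.2)
    | some o => (order, s.2.1, s.2.2 ++ [o ++ it])
  else (order, s.2.1, s.2.2)

def join1_alt (items : List (List String)) : List (List String) :=
  let st := items.foldl join1_step (none, [], [])
  match st.1 with
  | none => []
  | some o => st.2.1.map (fun p => o ++ p) ++ st.2.2

-- ===== PRECONDITION & SPEC =====
-- Pre_ holds exactly when no sublist is empty: on an empty sublist Python's item[0] raises IndexError.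
def Pre_join1 (items : List (List String)) : Prop := ∀ it ∈ items, it ≠ []
instance (items : List (List String)) : Decidable (Pre_join1 items) := by unfold Pre_join1; infer_instance
def pvWitness_join1 : List (List String) :=
  [["line_item", "a"], ["order", "1"], ["x"], ["line_item", "b"]]
def Spec_join1 (items : List (List String)) (out : List (List String)) : Prop := out = join1_alt items
instance (items : List (List String)) (out : List (List String)) : Decidable (Spec_join1 items out) := by unfold Spec_join1; infer_instance

-- ===== CLAIM (what is proved, stated in full; the proofs are below) =====
def Claim_equal_join1 : Prop := ∀ (items : List (List String)), Dom_join1 items → Pre_join1 items → Spec_join1 items (join1 items)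

-- ===== LEMMAS AND PROOFS =====

-- common spec pieces
def join1_isOrder (it : List String) : Bool := decide (PySem.List.pyGet? it 0 = some "order")
def join1_isLine (it : List String) : Bool := decide (PySem.List.pyGet? it 0 = some "line_item")

def join1_first? (items : List (List String)) : Option (List String) :=
  items.find? join1_isOrder

def join1_lines (items : List (List String)) : List (List String) :=
  items.filter join1_isLine

theorem first?_cons_order {it : List String} (rest : List (List String))
    (h : PySem.List.pyGet? it 0 = some "order") :
    join1_first? (it :: rest) = some it := by
  simp [join1_first?, join1_isOrder, h]

theorem first?_cons_not {it : List String} (rest : List (List String))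
    (h : ¬ PySem.List.pyGet? it 0 = some "order") :
    join1_first? (it :: rest) = join1_first? rest := by
  simp [join1_first?, join1_isOrder, h]

theorem lines_cons_line {it : List String} (rest : List (List String))
    (h : PySem.List.pyGet? it 0 = some "line_item") :
    join1_lines (it :: rest) = it :: join1_lines rest := by
  simp [join1_lines, join1_isLine, h]

theorem lines_cons_not {it : List String} (rest : List (List String))
    (h : ¬ PySem.List.pyGet? it 0 = some "line_item") :
    join1_lines (it :: rest) = join1_lines rest := by
  simp [join1_lines, join1_isLine, h]

theorem order_not_line {it : List String} (h : PySem.List.pyGet? it 0 = some "order") :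
    ¬ PySem.List.pyGet? it 0 = some "line_item" := by rw [h]; simp

theorem findOrder_eq (items : List (List String)) :
    join1_findOrder items = (join1_first? items).getD [] := by
  induction items with
  | nil => rfl
  | cons it rest ih =>
    by_cases h : PySem.List.pyGet? it 0 = some "order"
    · simp [join1_findOrder, h, first?_cons_order rest h]
    · simp [join1_findOrder, h, first?_cons_not rest h, ih]

theorem first?_nonempty {items : List (List String)} {o : List String}
    (h : join1_first? items = some o) : o ≠ [] := by
  have hp := List.find?_some h
  simp [join1_isOrder] at hp
  intro he
  subst he
  simp [PySem.List.pyGet?] at hp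

-- A's second loop collects o ++ each line_item
theorem join1_A_loop (o : List String) (items res : List (List String)) :
    items.foldl (fun res item =>
        if PySem.List.pyGet? item 0 = some "line_item" then res ++ [o ++ item] else res) res
      = res ++ (join1_lines items).map (fun it => o ++ it) := by
  induction items generalizing res with
  | nil => simp [join1_lines]
  | cons it rest ih =>
    by_cases h : PySem.List.pyGet? it 0 = some "line_item"
    · simp [h, ih, lines_cons_line rest h]
    · simp [h, ih, lines_cons_not rest h]

-- A computes the spec shape
theorem join1_eq_spec (items : List (List String)) :
    join1 items = match join1_first? items with
      | none => []
      | some o => (join1_lines items).map (fun it => o ++ it) := by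
  unfold join1
  rw [findOrder_eq]
  cases h : join1_first? items with
  | none => simp
  | some o =>
    have ho : o ≠ [] := first?_nonempty h
    have hlen : o.length ≠ 0 := by simpa [List.length_eq_zero_iff] using ho
    rw [Option.getD_some, if_neg hlen, join1_A_loop]
    simp

-- B's loop after the order was found
theorem loop_some (items : List (List String)) (o : List String)
    (pend res : List (List String)) :
    items.foldl join1_step (some o, pend, res)
      = (some o, pend, res ++ (join1_lines items).map (fun it => o ++ it)) := by
  induction items generalizing res with
  | nil => simp [join1_lines]
  | cons it rest ih =>
    simp only [List.foldl_cons]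
    by_cases h : PySem.List.pyGet? it 0 = some "line_item"
    · rw [lines_cons_line rest h]; simp [join1_step, h, ih]
    · rw [lines_cons_not rest h]; simp [join1_step, h, ih]

-- B's loop before the order was found
theorem loop_none (items : List (List String)) (pend : List (List String)) :
    (match (items.foldl join1_step (none, pend, [])).1 with
      | none => ([] : List (List String))
      | some o => (items.foldl join1_step (none, pend, [])).2.1.map (fun p => o ++ p)
          ++ (items.foldl join1_step (none, pend, [])).2.2)
      = match join1_first? items with
        | none => []
        | some o => pend.map (fun p => o ++ p) ++ (join1_lines items).map (fun it => o ++ it) := by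
  induction items generalizing pend with
  | nil => simp [join1_first?]
  | cons it rest ih =>
    by_cases ho : PySem.List.pyGet? it 0 = some "order"
    · have hl := order_not_line ho
      have hstep : join1_step (none, pend, []) it = (some it, pend, []) := by
        simp [join1_step, ho]
      rw [List.foldl_cons, hstep, loop_some, first?_cons_order rest ho, lines_cons_not rest hl]
      simp
    · by_cases hl : PySem.List.pyGet? it 0 = some "line_item"
      · have hstep : join1_step (none, pend, []) it = (none, pend ++ [it], []) := by
          simp [join1_step, ho, hl]
        rw [List.foldl_cons, hstep, ih (pend ++ [it]), first?_cons_not rest ho,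
          lines_cons_line rest hl]
        cases h : join1_first? rest <;> simp
      · have hstep : join1_step (none, pend, []) it = (none, pend, []) := by
          simp [join1_step, ho, hl]
        rw [List.foldl_cons, hstep, ih pend, first?_cons_not rest ho, lines_cons_not rest hl]

theorem join1_alt_eq_spec (items : List (List String)) :
    join1_alt items = match join1_first? items with
      | none => []
      | some o => (join1_lines items).map (fun it => o ++ it) := by
  unfold join1_alt
  have h := loop_none items []
  simpa using h

-- ===== VERDICT (by name: the statement is the Claim_ definition above) =====
theorem join1_spec : Claim_equal_join1 := by
  intro items _ _
  unfold Spec_join1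
  rw [join1_eq_spec, join1_alt_eq_spec]
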